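-- pv_equiv track=rewrite | github.com/abalaei/sepsis | preprocessing.py | violation_summary
-- ===== SOURCE A (Python) =====
-- def violation_summary(alignment_result):
--     violations = {"missing_antibiotics": 0, "missing_lactate": 0, "lab_order_swaps": 0}
--     for a in alignment_result:
--         moves = a['alignment']
--         # Example: check if antibiotics transition never matched
--         if not any(m[1] == "IV Antibiotics" and m[0] != ">>" for m in moves):
--             violations["missing_antibiotics"] += 1
--         # Example: check if lactate missing
--         if not any(m[1] == "Lactate" and m[0] != ">>" for m in moves):
--             violations["missing_lactate"] += 1
--         # Example: lab order swap (CRP before lactate)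
--         labs = [m[1] for m in moves if m[1] in ["CRP", "Lactate", "Leucocytes"] and m[0] != ">>"]
--         if "CRP" in labs and "Lactate" in labs and labs.index("CRP") < labs.index("Lactate"):
--             violations["lab_order_swaps"] += 1
--     return violations
-- ===== SOURCE B (Python) =====
-- def violation_summary(alignment_result):
--     missing_antibiotics = 0
--     missing_lactate = 0
--     lab_order_swaps = 0
--     for a in alignment_result:
--         has_ab = False
--         crp_pos = None
--         lac_pos = None
--         for i, m in enumerate(a['alignment']):
--             if m[0] != '>>':
--                 if m[1] == 'IV Antibiotics':
--                     has_ab = True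
--                 elif m[1] == 'Lactate':
--                     if lac_pos is None:
--                         lac_pos = i
--                 elif m[1] == 'CRP':
--                     if crp_pos is None:
--                         crp_pos = i
--         if not has_ab:
--             missing_antibiotics += 1
--         if lac_pos is None:
--             missing_lactate += 1
--         if crp_pos is not None and lac_pos is not None and crp_pos < lac_pos:
--             lab_order_swaps += 1
--     return {"missing_antibiotics": missing_antibiotics,
--             "missing_lactate": missing_lactate,
--             "lab_order_swaps": lab_order_swaps}
-- ===== Notes on version B (the rewrite author's own statement) =====
-- stated objective: simpler
-- what changed: Replaces the two any()-scans and the filtered labs-list with its .index() rescans by a single enumerate pass per alignment that records an antibiotics flag and the first qualifying Lactate/CRP move positions, then derives all three counters from that state.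
import Mathlib
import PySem

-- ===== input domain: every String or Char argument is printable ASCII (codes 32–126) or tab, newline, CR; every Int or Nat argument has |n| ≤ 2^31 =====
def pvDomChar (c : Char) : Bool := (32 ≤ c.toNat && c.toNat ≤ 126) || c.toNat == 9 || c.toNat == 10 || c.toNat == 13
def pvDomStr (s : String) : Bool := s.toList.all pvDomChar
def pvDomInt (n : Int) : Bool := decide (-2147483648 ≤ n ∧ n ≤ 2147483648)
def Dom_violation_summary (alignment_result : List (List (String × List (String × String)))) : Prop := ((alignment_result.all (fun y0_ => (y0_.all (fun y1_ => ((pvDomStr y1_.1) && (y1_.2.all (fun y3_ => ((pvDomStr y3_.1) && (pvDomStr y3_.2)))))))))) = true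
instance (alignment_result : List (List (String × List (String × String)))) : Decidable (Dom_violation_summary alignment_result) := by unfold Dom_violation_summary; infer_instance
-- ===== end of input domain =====

-- B replaces A's repeated scans (two any(), a filtered labs list, two list.index) by one
-- enumerate pass per alignment tracking an antibiotics flag and first Lactate/CRP positions.

-- ===== PORT A =====
-- loop body of A's 'for a in alignment_result' (violations dict is the accumulator)
def vsStepA (violations : PySem.Dict String Int) (a : List (String × List (String × String))) :
    PySem.Dict String Int :=
  let moves := ((PySem.Dict.mk a).get? "alignment").getD []
  let violations :=
    if !(moves.any fun m => m.2 == "IV Antibiotics" && !(m.1 == ">>")) then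
      violations.insert "missing_antibiotics" (violations.getD "missing_antibiotics" 0 + 1)
    else violations
  let violations :=
    if !(moves.any fun m => m.2 == "Lactate" && !(m.1 == ">>")) then
      violations.insert "missing_lactate" (violations.getD "missing_lactate" 0 + 1)
    else violations
  let labs := (moves.filter fun m =>
      (["CRP", "Lactate", "Leucocytes"] : List String).contains m.2 && !(m.1 == ">>")).map (·.2)
  if labs.contains "CRP" && labs.contains "Lactate" &&
      decide ((PySem.List.index? labs "CRP").getD 0 < (PySem.List.index? labs "Lactate").getD 0) then
    violations.insert "lab_order_swaps" (violations.getD "lab_order_swaps" 0 + 1)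
  else violations

def violation_summary (alignment_result : List (List (String × List (String × String)))) :
    List (String × Int) :=
  let violations : PySem.Dict String Int :=
    PySem.Dict.mk [("missing_antibiotics", 0), ("missing_lactate", 0), ("lab_order_swaps", 0)]
  (alignment_result.foldl vsStepA violations).items

-- ===== PORT B =====
-- inner loop body of B: state = (has_ab, crp_pos, lac_pos), element = (i, m) from enumerate
def vsInnerB (st : Bool × Option Int × Option Int) (im : Int × (String × String)) :
    Bool × Option Int × Option Int :=
  if !(im.2.1 == ">>") then
    if im.2.2 == "IV Antibiotics" then (true, st.2.1, st.2.2)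
    else if im.2.2 == "Lactate" then
      (st.1, st.2.1, if st.2.2.isNone then some im.1 else st.2.2)
    else if im.2.2 == "CRP" then
      (st.1, (if st.2.1.isNone then some im.1 else st.2.1), st.2.2)
    else st
  else st

-- outer loop body of B: accumulator = (missing_antibiotics, missing_lactate, lab_order_swaps)
def vsStepB (t : Int × Int × Int) (a : List (String × List (String × String))) :
    Int × Int × Int :=
  let st := (PySem.List.enumerate (((PySem.Dict.mk a).get? "alignment").getD [])).foldl
    vsInnerB (false, none, none)
  let t1 := if !st.1 then t.1 + 1 else t.1
  let t2 := if st.2.2.isNone then t.2.1 + 1 else t.2.1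
  let t3 := match st.2.1, st.2.2 with
    | some c, some l => if c < l then t.2.2 + 1 else t.2.2
    | _, _ => t.2.2
  (t1, t2, t3)

def violation_summary_alt (alignment_result : List (List (String × List (String × String)))) :
    List (String × Int) :=
  let t := alignment_result.foldl vsStepB (0, 0, 0)
  [("missing_antibiotics", t.1), ("missing_lactate", t.2.1), ("lab_order_swaps", t.2.2)]

-- ===== PRECONDITION & SPEC =====
-- Pre_ excludes exactly the inputs where Python A raises KeyError: an element dict without
-- the key 'alignment' (B raises there too).
def Pre_violation_summary (alignment_result : List (List (String × List (String × String)))) : Prop :=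
  ∀ a ∈ alignment_result, ((PySem.Dict.mk a).get? "alignment").isSome = true
instance (alignment_result : List (List (String × List (String × String)))) : Decidable (Pre_violation_summary alignment_result) := by unfold Pre_violation_summary; infer_instance

def pvWitness_violation_summary : (List (List (String × List (String × String)))) :=
  [[("alignment", [(">>", "Lactate"), ("sync", "CRP")])]]

def Spec_violation_summary (alignment_result : List (List (String × List (String × String)))) (out : List (String × Int)) : Prop := out = violation_summary_alt alignment_result
instance (alignment_result : List (List (String × List (String × String)))) (out : List (String × Int)) : Decidable (Spec_violation_summary alignment_result out) := by unfold Spec_violation_summary; infer_instance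

-- ===== CLAIM (what is proved, stated in full; the proofs are below) =====
def Claim_equal_violation_summary : Prop := ∀ (alignment_result : List (List (String × List (String × String)))), Dom_violation_summary alignment_result → Pre_violation_summary alignment_result → Spec_violation_summary alignment_result (violation_summary alignment_result)

-- ===== LEMMAS AND PROOFS =====

-- first index (counting from i) of a move m with m[0] != '>>' and p m
def vsFirst (p : String × String → Bool) : Int → List (String × String) → Option Int
  | _, [] => none
  | i, m :: t => if !(m.1 == ">>") && p m then some i else vsFirst p (i + 1) t

lemma vsFirst_mono (p : String × String → Bool) :
    ∀ (t : List (String × String)) (i j : Int), vsFirst p i t = some j → i ≤ j := by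
  intro t
  induction t with
  | nil => intro i j h; simp [vsFirst] at h
  | cons m t ih =>
    intro i j h
    simp only [vsFirst] at h
    by_cases hc : (!(m.1 == ">>") && p m) = true
    · simp [hc] at h; omega
    · simp [hc] at h; have := ih (i + 1) j h; omega

-- characterisation of B's inner fold
lemma vsInner_char :
    ∀ (moves : List (String × String)) (i : Int) (b : Bool) (c l : Option Int),
      (PySem.List.enumerate moves i).foldl vsInnerB (b, c, l) =
        (b || moves.any (fun m => !(m.1 == ">>") && m.2 == "IV Antibiotics"),
         (match c with | some x => some x | none => vsFirst (fun m => m.2 == "CRP") i moves),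
         (match l with | some x => some x | none => vsFirst (fun m => m.2 == "Lactate") i moves)) := by
  intro moves
  induction moves with
  | nil => intro i b c l; cases c <;> cases l <;> simp [PySem.List.enumerate, vsFirst]
  | cons m t ih =>
    intro i b c l
    rw [PySem.List.enumerate_cons]
    simp only [List.foldl_cons, List.any_cons]
    by_cases hq : (m.1 == ">>") = true
    · have h1 : vsInnerB (b, c, l) (i, m) = (b, c, l) := by simp [vsInnerB, hq]
      rw [h1, ih]
      simp [vsFirst, hq]
    · simp only [Bool.not_eq_true] at hq
      by_cases hab : (m.2 == "IV Antibiotics") = true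
      · have h1 : vsInnerB (b, c, l) (i, m) = (true, c, l) := by simp [vsInnerB, hq, hab]
        rw [h1, ih]
        have hc : (m.2 == "CRP") = false := by
          have := eq_of_beq hab; rw [this]; decide
        have hl : (m.2 == "Lactate") = false := by
          have := eq_of_beq hab; rw [this]; decide
        simp [vsFirst, hq, hab, hc, hl]
      · by_cases hl : (m.2 == "Lactate") = true
        · have h1 : vsInnerB (b, c, l) (i, m) =
              (b, c, if l.isNone then some i else l) := by simp [vsInnerB, hq, hab, hl]
          rw [h1, ih]
          have hc : (m.2 == "CRP") = false := by
            have := eq_of_beq hl; rw [this]; decide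
          cases l <;> simp [vsFirst, hq, hab, hc, hl]
        · by_cases hc : (m.2 == "CRP") = true
          · have h1 : vsInnerB (b, c, l) (i, m) =
                (b, (if c.isNone then some i else c), l) := by simp [vsInnerB, hq, hab, hl, hc]
            rw [h1, ih]
            cases c <;> simp [vsFirst, hq, hab, hl, hc]
          · have h1 : vsInnerB (b, c, l) (i, m) = (b, c, l) := by simp [vsInnerB, hq, hab, hl, hc]
            rw [h1, ih]
            simp [vsFirst, hq, hab, hl, hc]

-- A's labs list for one alignment
def vsLabs (moves : List (String × String)) : List String :=
  (moves.filter fun m =>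
    (["CRP", "Lactate", "Leucocytes"] : List String).contains m.2 && !(m.1 == ">>")).map (·.2)

lemma vsLabs_cons_pos (m : String × String) (t : List (String × String))
    (h : ((["CRP", "Lactate", "Leucocytes"] : List String).contains m.2 && !(m.1 == ">>")) = true) :
    vsLabs (m :: t) = m.2 :: vsLabs t := by
  simp only [vsLabs, List.filter_cons, h, if_true, List.map_cons]

lemma vsLabs_cons_neg (m : String × String) (t : List (String × String))
    (h : ((["CRP", "Lactate", "Leucocytes"] : List String).contains m.2 && !(m.1 == ">>")) = false) :
    vsLabs (m :: t) = vsLabs t := by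
  simp only [vsLabs, List.filter_cons, h]
  simp

-- a name outside the lab triple never equals a qualifying head's label unless listed
lemma vsNotLab_ne (m : String × String) (name : String)
    (hm : ((["CRP", "Lactate", "Leucocytes"] : List String).contains m.2) = false)
    (hn : ((["CRP", "Lactate", "Leucocytes"] : List String).contains name) = true) :
    (m.2 == name) = false := by
  cases hbe : (m.2 == name)
  · rfl
  · rw [eq_of_beq hbe] at hm; rw [hm] at hn; cases hn

-- an any-scan for a lab name equals presence of a first qualifying position
lemma vsAny_isSome (name : String) :
    ∀ (t : List (String × String)) (i : Int),
      (t.any fun m => m.2 == name && !(m.1 == ">>")) =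
        (vsFirst (fun m => m.2 == name) i t).isSome := by
  intro t
  induction t with
  | nil => intro i; simp [vsFirst]
  | cons m t ih =>
    intro i
    simp only [List.any_cons, vsFirst]
    by_cases hq : (m.1 == ">>") = true
    · simp only [hq]
      simpa using ih (i + 1)
    · simp only [Bool.not_eq_true] at hq
      by_cases he : (m.2 == name) = true
      · simp [hq, he]
      · simp only [hq, he]
        simpa using ih (i + 1)

-- labs-membership of a lab name equals presence of a first qualifying position
lemma vsLabs_contains (name : String)
    (hname : (["CRP", "Lactate", "Leucocytes"] : List String).contains name = true) :
    ∀ (t : List (String × String)) (i : Int),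
      (vsLabs t).contains name = (vsFirst (fun m => m.2 == name) i t).isSome := by
  intro t
  induction t with
  | nil => intro i; simp [vsLabs, vsFirst]
  | cons m t ih =>
    intro i
    by_cases hq : (m.1 == ">>") = true
    · have h1 : ((["CRP", "Lactate", "Leucocytes"] : List String).contains m.2 &&
          !(m.1 == ">>")) = false := by simp [hq]
      rw [vsLabs_cons_neg m t h1]
      have h2 : vsFirst (fun m => m.2 == name) i (m :: t) =
          vsFirst (fun m => m.2 == name) (i + 1) t := by simp [vsFirst, hq]
      rw [h2]; exact ih (i + 1)
    · simp only [Bool.not_eq_true] at hq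
      cases hm : ((["CRP", "Lactate", "Leucocytes"] : List String).contains m.2) with
      | true =>
        rw [vsLabs_cons_pos m t (by rw [hm, hq]; rfl)]
        rw [List.contains_cons]
        cases he : (m.2 == name) with
        | true =>
          have hne : (name == m.2) = true := by
            rw [eq_of_beq he]; exact beq_self_eq_true name
          simp only [hne, Bool.true_or]
          have : vsFirst (fun m => m.2 == name) i (m :: t) = some i := by
            simp [vsFirst, hq, he]
          rw [this]; rfl
        | false =>
          have hne : (name == m.2) = false := by
            cases hbe : (name == m.2)
            · rfl
            · have hx := eq_of_beq hbe; rw [hx] at he; simp at he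
          simp only [hne, Bool.false_or]
          have : vsFirst (fun m => m.2 == name) i (m :: t) =
              vsFirst (fun m => m.2 == name) (i + 1) t := by simp [vsFirst, hq, he]
          rw [this]; exact ih (i + 1)
      | false =>
        rw [vsLabs_cons_neg m t (by rw [hm]; rfl)]
        have he := vsNotLab_ne m name hm hname
        have : vsFirst (fun m => m.2 == name) i (m :: t) =
            vsFirst (fun m => m.2 == name) (i + 1) t := by simp [vsFirst, he]
        rw [this]; exact ih (i + 1)

-- the swap condition of A equals B's first-position comparison
lemma vsSwap_eq :
    ∀ (moves : List (String × String)) (i : Int),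
      ((vsLabs moves).contains "CRP" && (vsLabs moves).contains "Lactate" &&
        decide ((PySem.List.index? (vsLabs moves) "CRP").getD 0 <
                (PySem.List.index? (vsLabs moves) "Lactate").getD 0)) =
      (match vsFirst (fun m => m.2 == "CRP") i moves,
             vsFirst (fun m => m.2 == "Lactate") i moves with
       | some c, some l => decide (c < l)
       | _, _ => false) := by
  intro moves
  induction moves with
  | nil => intro i; simp [vsLabs, vsFirst]
  | cons m t ih =>
    intro i
    by_cases hq : (m.1 == ">>") = true
    · rw [vsLabs_cons_neg m t (by simp [hq])]
      have e2 : ∀ p, vsFirst p i (m :: t) = vsFirst p (i + 1) t := by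
        intro p; simp [vsFirst, hq]
      rw [e2, e2, ih]
    · simp only [Bool.not_eq_true] at hq
      by_cases hm : ((["CRP", "Lactate", "Leucocytes"] : List String).contains m.2) = true
      · rw [vsLabs_cons_pos m t (by rw [hm, hq]; rfl)]
        by_cases hc : (m.2 == "CRP") = true
        · -- head is a qualifying CRP
          have hceq := eq_of_beq hc
          have e2 : vsFirst (fun m => m.2 == "CRP") i (m :: t) = some i := by
            simp [vsFirst, hq, hc]
          have hlne : (m.2 == "Lactate") = false := by rw [hceq]; decide
          have e3 : vsFirst (fun m => m.2 == "Lactate") i (m :: t) =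
              vsFirst (fun m => m.2 == "Lactate") (i + 1) t := by
            simp [vsFirst, hq, hlne]
          rw [e2, e3, hceq]
          rw [PySem.List.index?_cons_self]
          rw [PySem.List.index?_cons_of_ne (x := "CRP") (v := "Lactate") (vsLabs t) (by decide)]
          have hcl := vsLabs_contains "Lactate" (by decide) t (i + 1)
          cases hfl : vsFirst (fun m => m.2 == "Lactate") (i + 1) t with
          | none =>
            have hcf : (vsLabs t).contains "Lactate" = false := by rw [hcl, hfl]; rfl
            have hnot : "Lactate" ∉ vsLabs t := by simpa using hcf
            simp [hnot]
          | some l =>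
            have hcont : (vsLabs t).contains "Lactate" = true := by rw [hcl, hfl]; rfl
            have hmem : "Lactate" ∈ vsLabs t := by simpa using hcont
            have hidx : (PySem.List.index? (vsLabs t) "Lactate").isSome = true := by
              rw [PySem.List.index?_isSome_iff]; exact hmem
            obtain ⟨k, hk⟩ := Option.isSome_iff_exists.mp hidx
            have hle := vsFirst_mono _ t (i + 1) l hfl
            rw [PySem.List.index?_eq_idxOf?] at hk
            simp [hmem, hk]
            omega
        · by_cases hlac : (m.2 == "Lactate") = true
          · -- head is a qualifying Lactate
            have hleq := eq_of_beq hlac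
            have e2 : vsFirst (fun m => m.2 == "Lactate") i (m :: t) = some i := by
              simp [vsFirst, hq, hlac]
            have e3 : vsFirst (fun m => m.2 == "CRP") i (m :: t) =
                vsFirst (fun m => m.2 == "CRP") (i + 1) t := by
              simp [vsFirst, hq, hc]
            rw [e2, e3, hleq]
            rw [PySem.List.index?_cons_self]
            rw [PySem.List.index?_cons_of_ne (x := "Lactate") (v := "CRP") (vsLabs t) (by decide)]
            cases hfc : vsFirst (fun m => m.2 == "CRP") (i + 1) t with
            | none =>
              have hcc := vsLabs_contains "CRP" (by decide) t (i + 1)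
              have hcf : (vsLabs t).contains "CRP" = false := by rw [hcc, hfc]; rfl
              have hnot : "CRP" ∉ vsLabs t := by simpa using hcf
              simp [hnot]
            | some c =>
              have hle := vsFirst_mono _ t (i + 1) c hfc
              have hnc : ¬ (c < i) := by omega
              rcases hik : List.idxOf? "CRP" (vsLabs t) with _ | k <;> simp [hik, hnc]
          · -- head is a qualifying Leucocytes (in the lab list, neither CRP nor Lactate)
            have e2 : ∀ (name : String), (m.2 == name) = false →
                vsFirst (fun m' => m'.2 == name) i (m :: t) =
                vsFirst (fun m' => m'.2 == name) (i + 1) t := by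
              intro name hne; simp [vsFirst, hne]
            simp only [Bool.not_eq_true] at hc hlac
            rw [e2 _ hc, e2 _ hlac]
            have hne1 : ("CRP" == m.2) = false := by
              cases hbe : ("CRP" == m.2)
              · rfl
              · rw [← eq_of_beq hbe, beq_self_eq_true] at hc; cases hc
            have hne2 : ("Lactate" == m.2) = false := by
              cases hbe : ("Lactate" == m.2)
              · rfl
              · rw [← eq_of_beq hbe, beq_self_eq_true] at hlac; cases hlac
            rw [PySem.List.index?_cons_of_ne (x := m.2) (v := "CRP") (vsLabs t)
              (fun h => by rw [h] at hc; simp at hc)]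
            rw [PySem.List.index?_cons_of_ne (x := m.2) (v := "Lactate") (vsLabs t)
              (fun h => by rw [h] at hlac; simp at hlac)]
            rw [← ih (i + 1)]
            rw [List.contains_cons, List.contains_cons, hne1, hne2]
            simp only [Bool.false_or]
            by_cases hC : (vsLabs t).contains "CRP" = true
            · by_cases hL : (vsLabs t).contains "Lactate" = true
              · have hiC : (PySem.List.index? (vsLabs t) "CRP").isSome = true := by
                  rw [PySem.List.index?_isSome_iff]; simpa using hC
                have hiL : (PySem.List.index? (vsLabs t) "Lactate").isSome = true := by
                  rw [PySem.List.index?_isSome_iff]; simpa using hL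
                obtain ⟨k1, hk1⟩ := Option.isSome_iff_exists.mp hiC
                obtain ⟨k2, hk2⟩ := Option.isSome_iff_exists.mp hiL
                simp only [hC, hL, hk1, hk2, Option.map_some, Option.getD_some, Bool.true_and]
                simp only [decide_eq_decide]
                omega
              · have hL' : (vsLabs t).contains "Lactate" = false := by simpa using hL
                rw [hL']
                simp
            · have hC' : (vsLabs t).contains "CRP" = false := by simpa using hC
              rw [hC']
              simp
      · have hm' : ((["CRP", "Lactate", "Leucocytes"] : List String).contains m.2) = false := by
          simpa using hm
        rw [vsLabs_cons_neg m t (by rw [hm']; rfl)]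
        have e2 : ∀ (name : String),
            ((["CRP", "Lactate", "Leucocytes"] : List String).contains name = true) →
            vsFirst (fun m' => m'.2 == name) i (m :: t) =
            vsFirst (fun m' => m'.2 == name) (i + 1) t := by
          intro name hn
          simp [vsFirst, vsNotLab_ne m name hm' hn]
        rw [e2 "CRP" (by decide), e2 "Lactate" (by decide), ih]

-- one outer step: A's dict step on the canonical 3-key dict mirrors B's triple step
lemma vsStep_eq (a : List (String × List (String × String))) (x y z : Int) :
    vsStepA (PySem.Dict.mk
        [("missing_antibiotics", x), ("missing_lactate", y), ("lab_order_swaps", z)]) a =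
      PySem.Dict.mk
        [("missing_antibiotics", (vsStepB (x, y, z) a).1),
         ("missing_lactate", (vsStepB (x, y, z) a).2.1),
         ("lab_order_swaps", (vsStepB (x, y, z) a).2.2)] := by
  unfold vsStepA vsStepB
  rw [vsInner_char]
  simp only [Bool.false_or]
  have hab : (((PySem.Dict.mk a).get? "alignment").getD []).any
        (fun m => m.2 == "IV Antibiotics" && !(m.1 == ">>")) =
      (((PySem.Dict.mk a).get? "alignment").getD []).any
        (fun m => !(m.1 == ">>") && m.2 == "IV Antibiotics") := by
    apply PySem.List.any_congr_mem; intro m _; exact Bool.and_comm _ _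
  have hlac := vsAny_isSome "Lactate" (((PySem.Dict.mk a).get? "alignment").getD []) 0
  have hswap := vsSwap_eq (((PySem.Dict.mk a).get? "alignment").getD []) 0
  rw [hab, hlac]
  rw [show ((((PySem.Dict.mk a).get? "alignment").getD []).filter fun m =>
      (["CRP", "Lactate", "Leucocytes"] : List String).contains m.2 && !(m.1 == ">>")).map (·.2) =
      vsLabs (((PySem.Dict.mk a).get? "alignment").getD []) from rfl]
  rw [hswap]
  cases hA : (((PySem.Dict.mk a).get? "alignment").getD []).any
      (fun m => !(m.1 == ">>") && m.2 == "IV Antibiotics") <;>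
  cases hC : vsFirst (fun m => m.2 == "CRP") 0 (((PySem.Dict.mk a).get? "alignment").getD []) <;>
  cases hL : vsFirst (fun m => m.2 == "Lactate") 0 (((PySem.Dict.mk a).get? "alignment").getD []) <;>
  · simp only [hC, hL, Option.isSome_none, Option.isSome_some, Option.isNone_none,
      Option.isNone_some, Bool.not_false, Bool.not_true, if_true, if_false]
    apply PySem.Dict.ext
    simp [PySem.Dict.insert, PySem.Dict.getD, PySem.Dict.get?]
    try (split <;> rename_i hss <;> first | simp [hss] | simp)

-- main fold invariant
lemma vs_fold_eq :
    ∀ (ar : List (List (String × List (String × String)))) (x y z : Int),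
      ar.foldl vsStepA (PySem.Dict.mk
        [("missing_antibiotics", x), ("missing_lactate", y), ("lab_order_swaps", z)]) =
      PySem.Dict.mk
        [("missing_antibiotics", (ar.foldl vsStepB (x, y, z)).1),
         ("missing_lactate", (ar.foldl vsStepB (x, y, z)).2.1),
         ("lab_order_swaps", (ar.foldl vsStepB (x, y, z)).2.2)] := by
  intro ar
  induction ar with
  | nil => intro x y z; rfl
  | cons a t ih =>
    intro x y z
    simp only [List.foldl_cons]
    rw [vsStep_eq]
    rw [ih]

-- ===== VERDICT (by name: the statement is the Claim_ definition above) =====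
theorem violation_summary_spec : Claim_equal_violation_summary := by
  intro ar _ _
  simp only [Spec_violation_summary, violation_summary, violation_summary_alt]
  rw [vs_fold_eq]
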